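-- pv_equiv track=rewrite | github.com/stack-of-tasks/sot-gui | src/sot_gui/dot_data_generator.py | _get_html_rows_for_node
-- ===== SOURCE A (Python) =====
-- from typing import Dict, Tuple, List, Any
--
-- def _get_html_rows_for_node(label: str, inputs: List[Tuple[str]],
--                             outputs: List[Tuple[str]]) -> str:
--     """ Generates html code for the rows of a node.
--
--     Args:
--         label: label of the node
--         inputs: input ports of the node, as a list of tuples (input_name,
--             input_label).
--         outputs: output ports of the node, as a list of tuples (output_name,
--             output_label).
--
--     Returns:
--         Html code for the rows of the node, as a string.
--     """
--
--     # We determine which column (inputs or outputs) has more rows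
--     inputs_nb = len(inputs)
--     outputs_nb = len(outputs)
--     max_nb = None
--     if inputs_nb > outputs_nb:
--         max_nb = 'inputs'
--     elif inputs_nb < outputs_nb:
--         max_nb = 'outputs'
--     nb_rows = max(inputs_nb, outputs_nb)
--
--     input_count, output_count = 0, 0
--
--     # For each row, we add its elements from left to right.
--     # Online tool to generate html tables based on the desired layout:
--     # https://www.tablesgenerator.com/html_tables
--     rows_html = ""
--     for i in range(nb_rows):
--         input, output = None, None
--         rowspan_input, rowspan_output = 1, 1
--         remaining_nb_rows = nb_rows - i
--
--         # If there are more inputs, each input cell will have a rowspan of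
--         # 1, the middle column (node's label) will have a rowspan of
--         # `inputs_nb`, and each output cell will span over
--         # `inputs_nb // outputs_nb` nb of lines, except the last one which
--         # will span over the remaining available rows.
--         if max_nb == 'inputs':
--             input = inputs[i]
--             rowspan_output = inputs_nb // outputs_nb
--             if (output_count < outputs_nb and
--                 i == output_count * rowspan_output):
--                 output = outputs[output_count]
--                 if output_count == outputs_nb - 1: # If it's the last output
--                     rowspan_output = remaining_nb_rows
--                 output_count += 1
--             input_count += 1
--
--         # The same logic applies if there are more outputs
--         elif max_nb == 'outputs':
--             output = outputs[i]
--             rowspan_input = outputs_nb // inputs_nb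
--             if input_count < inputs_nb and i == input_count * rowspan_input:
--                 input = inputs[input_count]
--                 if input_count == inputs_nb - 1: # If it's the last input
--                     rowspan_input = remaining_nb_rows
--                 input_count += 1
--             output_count += 1
--
--         # If `inputs_nb` and `outputs_nb` are equal, we add one input and
--         # one output on each row, so both with a rowspan of 1
--         else:
--             input = inputs[i]
--             output = outputs[i]
--             input_count += 1
--             output_count += 1
--
--         # Creating the html code for the row
--         input_cell = ''
--         if input is not None:
--             (in_name, in_label) = input
--             input_cell = (f'\t\t\t<TD ROWSPAN="{rowspan_input}" '
--                 f'PORT="{in_name}">{in_label}</TD>\n')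
--
--         # The node's label is added to the first row and spans over each row
--         label_cell = ''
--         if i == 0:
--             label_cell = f'\t\t\t<TD ROWSPAN="{nb_rows}">{label}</TD>\n'
--
--         output_cell = ''
--         if output is not None:
--             (out_name, out_label) = output
--             output_cell = (f'\t\t\t<TD ROWSPAN="{rowspan_output}" '
--                 f'PORT="{out_name}">{out_label}</TD>\n')
--
--         row_content = input_cell + label_cell + output_cell
--         rows_html += f'\t\t<TR>\n{row_content}\t\t</TR>\n'
--
--     return rows_html
-- ===== SOURCE B (Python) =====
-- from typing import Dict, Tuple, List, Any
--
-- def _get_html_rows_for_node(label: str, inputs: List[Tuple[str]],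
--                             outputs: List[Tuple[str]]) -> str:
--     """Row-placement-map re-implementation: compute where every port goes
--     (row index -> (port, rowspan)) up front, then assemble the rows in one
--     uniform pass."""
--     inputs_nb = len(inputs)
--     outputs_nb = len(outputs)
--     nb_rows = max(inputs_nb, outputs_nb)
--
--     # Placement maps: row index -> ((name, label), rowspan)
--     in_at = {}
--     out_at = {}
--     if inputs_nb == outputs_nb:
--         for i, port in enumerate(inputs):
--             in_at[i] = (port, 1)
--         for i, port in enumerate(outputs):
--             out_at[i] = (port, 1)
--     elif inputs_nb > outputs_nb:
--         for i, port in enumerate(inputs):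
--             in_at[i] = (port, 1)
--         stride = inputs_nb // outputs_nb
--         for j, port in enumerate(outputs):
--             row = j * stride
--             span = nb_rows - row if j == outputs_nb - 1 else stride
--             out_at[row] = (port, span)
--     else:
--         for i, port in enumerate(outputs):
--             out_at[i] = (port, 1)
--         stride = outputs_nb // inputs_nb
--         for j, port in enumerate(inputs):
--             row = j * stride
--             span = nb_rows - row if j == inputs_nb - 1 else stride
--             in_at[row] = (port, span)
--
--     # One uniform assembly pass over the rows.
--     parts = []
--     for i in range(nb_rows):
--         cells = ''
--         if i in in_at:
--             (name, lab), span = in_at[i]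
--             cells += f'\t\t\t<TD ROWSPAN="{span}" PORT="{name}">{lab}</TD>\n'
--         if i == 0:
--             cells += f'\t\t\t<TD ROWSPAN="{nb_rows}">{label}</TD>\n'
--         if i in out_at:
--             (name, lab), span = out_at[i]
--             cells += f'\t\t\t<TD ROWSPAN="{span}" PORT="{name}">{lab}</TD>\n'
--         parts.append(f'\t\t<TR>\n{cells}\t\t</TR>\n')
--     return ''.join(parts)
-- ===== Notes on version B (the rewrite author's own statement) =====
-- stated objective: alternative
-- what changed: Replaces A's single loop with running input/output counters and in-loop placement decisions by two precomputed row->(port,rowspan) placement maps followed by one uniform assembly pass over the rows, joined at the end.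
import Mathlib
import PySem

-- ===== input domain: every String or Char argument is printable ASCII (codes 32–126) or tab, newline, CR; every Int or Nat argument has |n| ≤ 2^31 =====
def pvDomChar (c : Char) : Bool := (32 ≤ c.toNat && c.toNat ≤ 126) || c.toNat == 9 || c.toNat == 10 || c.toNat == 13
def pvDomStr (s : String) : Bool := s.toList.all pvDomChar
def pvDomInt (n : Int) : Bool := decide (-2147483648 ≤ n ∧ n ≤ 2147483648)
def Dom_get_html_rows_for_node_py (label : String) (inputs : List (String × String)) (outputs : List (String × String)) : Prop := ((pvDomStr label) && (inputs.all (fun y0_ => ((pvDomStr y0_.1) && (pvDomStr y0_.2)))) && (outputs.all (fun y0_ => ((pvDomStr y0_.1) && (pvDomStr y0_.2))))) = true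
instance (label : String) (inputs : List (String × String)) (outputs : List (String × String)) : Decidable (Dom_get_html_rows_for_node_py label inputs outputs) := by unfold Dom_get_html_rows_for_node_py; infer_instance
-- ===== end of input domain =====

-- B replaces A's single counter-driven loop by precomputed row->(port,rowspan) placement maps and
-- one uniform assembly pass (objective: alternative decomposition, same cost).

-- ===== PORT A =====
-- shared f-string pieces (both Pythons build these exact strings)
def pvPortCell (span : Int) (name lab : String) : String :=
  "\t\t\t<TD ROWSPAN=\"" ++ PySem.Int.toStr span ++ "\" PORT=\"" ++ name ++ "\">" ++ lab ++ "</TD>\n"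

def pvLabelCell (nb : Int) (label : String) : String :=
  "\t\t\t<TD ROWSPAN=\"" ++ PySem.Int.toStr nb ++ "\">" ++ label ++ "</TD>\n"

-- the body of A's `for i in range(nb_rows)` loop, step for step
def pvAStep (label : String) (inputs outputs : List (String × String)) (max_nb : Option String)
    (nb_rows : Int) (st : Int × Int × String) (i : Int) : Int × Int × String :=
  let inputs_nb : Int := inputs.length
  let outputs_nb : Int := outputs.length
  let input_count := st.1
  let output_count := st.2.1
  let rows_html := st.2.2
  let remaining_nb_rows := nb_rows - i
  -- (input, output, rowspan_input, rowspan_output, input_count, output_count) after the branch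
  let br : Option (String × String) × Option (String × String) × Int × Int × Int × Int :=
    if max_nb = some "inputs" then
      let input := PySem.List.pyGet? inputs i          -- always in range here (Python would raise otherwise)
      let rowspan_output := PySem.Int.floordiv inputs_nb outputs_nb  -- ZeroDivisionError when outputs_nb = 0: excluded by Pre_
      if output_count < outputs_nb ∧ i = output_count * rowspan_output then
        let output := PySem.List.pyGet? outputs output_count
        let rowspan_output := if output_count = outputs_nb - 1 then remaining_nb_rows else rowspan_output
        (input, output, 1, rowspan_output, input_count + 1, output_count + 1)
      else
        (input, none, 1, rowspan_output, input_count + 1, output_count)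
    else if max_nb = some "outputs" then
      let output := PySem.List.pyGet? outputs i
      let rowspan_input := PySem.Int.floordiv outputs_nb inputs_nb   -- ZeroDivisionError when inputs_nb = 0: excluded by Pre_
      if input_count < inputs_nb ∧ i = input_count * rowspan_input then
        let input := PySem.List.pyGet? inputs input_count
        let rowspan_input := if input_count = inputs_nb - 1 then remaining_nb_rows else rowspan_input
        (input, output, rowspan_input, 1, input_count + 1, output_count + 1)
      else
        (none, output, rowspan_input, 1, input_count, output_count + 1)
    else
      (PySem.List.pyGet? inputs i, PySem.List.pyGet? outputs i, 1, 1, input_count + 1, output_count + 1)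
  match br with
  | (input, output, rowspan_input, rowspan_output, input_count, output_count) =>
    let input_cell : String :=
      match input with
      | some (in_name, in_label) => pvPortCell rowspan_input in_name in_label
      | none => ""
    let label_cell : String := if i = 0 then pvLabelCell nb_rows label else ""
    let output_cell : String :=
      match output with
      | some (out_name, out_label) => pvPortCell rowspan_output out_name out_label
      | none => ""
    let row_content := input_cell ++ label_cell ++ output_cell
    (input_count, output_count, rows_html ++ ("\t\t<TR>\n" ++ row_content ++ "\t\t</TR>\n"))

def get_html_rows_for_node_py (label : String) (inputs : List (String × String)) (outputs : List (String × String)) : String :=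
  let inputs_nb : Int := inputs.length
  let outputs_nb : Int := outputs.length
  let max_nb : Option String :=
    if inputs_nb > outputs_nb then some "inputs"
    else if inputs_nb < outputs_nb then some "outputs"
    else none
  let nb_rows : Int := max inputs_nb outputs_nb
  ((PySem.List.pyRange 0 nb_rows).foldl (pvAStep label inputs outputs max_nb nb_rows) (0, 0, "")).2.2

-- ===== PORT B =====
-- placement map of the equal/majority column: every port on its own row, rowspan 1
def pvSpanOneDict (xs : List (String × String)) : PySem.Dict Int ((String × String) × Int) :=
  (PySem.List.enumerate xs 0).foldl (fun d p => d.insert p.1 (p.2, 1)) PySem.Dict.empty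

-- placement map of the minority column: port j on row j*stride, the last one spanning the rest
def pvStrideDict (xs : List (String × String)) (stride nb_rows : Int) : PySem.Dict Int ((String × String) × Int) :=
  (PySem.List.enumerate xs 0).foldl
    (fun d p =>
      let row := p.1 * stride
      let span := if p.1 = (xs.length : Int) - 1 then nb_rows - row else stride
      d.insert row (p.2, span))
    PySem.Dict.empty

-- one row of the uniform assembly pass
def pvBRow (label : String) (nb_rows : Int) (in_at out_at : PySem.Dict Int ((String × String) × Int))
    (i : Int) : String :=
  let cells :=
    (match in_at.get? i with
     | some (p, span) => pvPortCell span p.1 p.2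
     | none => "") ++
    (if i = 0 then pvLabelCell nb_rows label else "") ++
    (match out_at.get? i with
     | some (p, span) => pvPortCell span p.1 p.2
     | none => "")
  "\t\t<TR>\n" ++ cells ++ "\t\t</TR>\n"

def get_html_rows_for_node_py_alt (label : String) (inputs : List (String × String)) (outputs : List (String × String)) : String :=
  let inputs_nb : Int := inputs.length
  let outputs_nb : Int := outputs.length
  let nb_rows : Int := max inputs_nb outputs_nb
  let maps : PySem.Dict Int ((String × String) × Int) × PySem.Dict Int ((String × String) × Int) :=
    if inputs_nb = outputs_nb then
      (pvSpanOneDict inputs, pvSpanOneDict outputs)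
    else if inputs_nb > outputs_nb then
      (pvSpanOneDict inputs, pvStrideDict outputs (PySem.Int.floordiv inputs_nb outputs_nb) nb_rows)
    else
      (pvStrideDict inputs (PySem.Int.floordiv outputs_nb inputs_nb) nb_rows, pvSpanOneDict outputs)
  let parts : List String :=
    (PySem.List.pyRange 0 nb_rows).foldl (fun acc i => acc ++ [pvBRow label nb_rows maps.1 maps.2 i]) []
  PySem.Str.join "" parts

-- ===== PRECONDITION & SPEC =====
-- Pre_ excludes exactly the inputs where A raises ZeroDivisionError (one port list empty, the
-- other non-empty: the `//` stride divides by the empty side's length); B raises there as well.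
def Pre_get_html_rows_for_node_py (label : String) (inputs : List (String × String)) (outputs : List (String × String)) : Prop :=
  (inputs = [] ↔ outputs = [])
instance (label : String) (inputs : List (String × String)) (outputs : List (String × String)) : Decidable (Pre_get_html_rows_for_node_py label inputs outputs) := by unfold Pre_get_html_rows_for_node_py; infer_instance

def pvWitness_get_html_rows_for_node_py : String × (List (String × String)) × (List (String × String)) :=
  ("mynode", [("in0", "I0"), ("in1", "I1")], [("out0", "O0")])

def Spec_get_html_rows_for_node_py (label : String) (inputs : List (String × String)) (outputs : List (String × String)) (out : String) : Prop := out = get_html_rows_for_node_py_alt label inputs outputs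
instance (label : String) (inputs : List (String × String)) (outputs : List (String × String)) (out : String) : Decidable (Spec_get_html_rows_for_node_py label inputs outputs out) := by unfold Spec_get_html_rows_for_node_py; infer_instance

-- ===== CLAIM (what is proved, stated in full; the proofs are below) =====
def Claim_equal_get_html_rows_for_node_py : Prop := ∀ (label : String) (inputs : List (String × String)) (outputs : List (String × String)), Dom_get_html_rows_for_node_py label inputs outputs → Pre_get_html_rows_for_node_py label inputs outputs → Spec_get_html_rows_for_node_py label inputs outputs (get_html_rows_for_node_py label inputs outputs)

-- ===== LEMMAS AND PROOFS =====

theorem pv_join_empty_cons (x : String) (xs : List String) :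
    PySem.Str.join "" (x :: xs) = x ++ PySem.Str.join "" xs := by
  apply String.toList_inj.mp
  rw [String.toList_append, PySem.Str.toList_join, PySem.Str.toList_join]
  cases xs with
  | nil => simp [PySem.Chars.join_singleton, PySem.Chars.join_nil]
  | cons y ys => simp [List.map_cons, PySem.Chars.join_cons_cons]

theorem pv_spanOne_items (xs : List (String × String)) :
    (pvSpanOneDict xs).items
      = (PySem.List.enumerate xs 0).map (fun p => (p.1, (p.2, (1 : Int)))) := by
  unfold pvSpanOneDict
  rw [PySem.Dict.items_foldl_insert_fresh (PySem.List.enumerate xs 0) (fun p => p.1)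
      (fun p => (p.2, (1 : Int))) PySem.Dict.empty
      (fun a _ => PySem.Dict.contains_empty _)
      (by rw [PySem.List.map_fst_enumerate]; exact PySem.List.nodup_pyRange_one _ _)]
  rfl

theorem pv_spanOne_get?_hit (xs : List (String × String)) (j : Nat) (hj : j < xs.length) :
    (pvSpanOneDict xs).get? (j : Int) = some (xs[j], 1) := by
  have hnd : (pvSpanOneDict xs).keys.Nodup := by
    unfold pvSpanOneDict
    exact PySem.Dict.nodup_keys_foldl_insert_key _ _ _ _ (by simp)
  rw [PySem.Dict.get?_eq_some_iff_mem_items _ _ _ hnd, pv_spanOne_items]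
  have : ((j : Int), xs[j]) ∈ PySem.List.enumerate xs 0 := by
    rw [PySem.List.mem_enumerate_iff]
    exact ⟨j, hj, by simp⟩
  exact List.mem_map_of_mem this

theorem pv_stride_items (xs : List (String × String)) (s nb : Int) (hs : 0 < s) :
    (pvStrideDict xs s nb).items
      = (PySem.List.enumerate xs 0).map
          (fun p => (p.1 * s, (p.2, if p.1 = (xs.length : Int) - 1 then nb - p.1 * s else s))) := by
  unfold pvStrideDict
  rw [PySem.Dict.items_foldl_insert_fresh (PySem.List.enumerate xs 0) (fun p => p.1 * s)
      (fun p => (p.2, if p.1 = (xs.length : Int) - 1 then nb - p.1 * s else s)) PySem.Dict.empty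
      (fun a _ => PySem.Dict.contains_empty _) ?nodup]
  · rfl
  case nodup =>
    have : (fun (p : Int × (String × String)) => p.1 * s)
        = (fun (x : Int) => x * s) ∘ (fun p => p.1) := rfl
    rw [this, ← List.map_map, PySem.List.map_fst_enumerate]
    exact (PySem.List.nodup_pyRange_one _ _).map
      (fun a b hab => by
        have := mul_right_cancel₀ (ne_of_gt hs) hab
        exact this)

theorem pv_stride_nodup_keys (xs : List (String × String)) (s nb : Int) (hs : 0 < s) :
    (pvStrideDict xs s nb).keys.Nodup := by
  unfold pvStrideDict
  exact PySem.Dict.nodup_keys_foldl_insert_key _ _ _ _ (by simp)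

theorem pv_stride_get?_hit (xs : List (String × String)) (s nb : Int) (hs : 0 < s)
    (j : Nat) (hj : j < xs.length) :
    (pvStrideDict xs s nb).get? ((j : Int) * s)
      = some (xs[j], if (j : Int) = (xs.length : Int) - 1 then nb - (j : Int) * s else s) := by
  rw [PySem.Dict.get?_eq_some_iff_mem_items _ _ _ (pv_stride_nodup_keys xs s nb hs),
      pv_stride_items xs s nb hs]
  have : ((j : Int), xs[j]) ∈ PySem.List.enumerate xs 0 := by
    rw [PySem.List.mem_enumerate_iff]
    exact ⟨j, hj, by simp⟩
  exact List.mem_map_of_mem this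

theorem pv_stride_get?_miss (xs : List (String × String)) (s nb : Int) (hs : 0 < s)
    (i : Int) (h : ∀ j : Nat, j < xs.length → i ≠ (j : Int) * s) :
    (pvStrideDict xs s nb).get? i = none := by
  rw [PySem.Dict.get?_eq_none_iff_not_mem_keys]
  intro hmem
  rw [PySem.Dict.keys, pv_stride_items xs s nb hs, List.map_map, List.mem_map] at hmem
  obtain ⟨p, hp, hkey⟩ := hmem
  rw [PySem.List.mem_enumerate_iff] at hp
  obtain ⟨j, hj, rfl⟩ := hp
  exact h j hj (by simpa using hkey.symm)

-- helper: pyGet? at a nonnegative in-range Int index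
theorem pv_pyGet?_of_lt {α : Type} (xs : List α) (i : Int) (h0 : 0 ≤ i) (h : i.toNat < xs.length) :
    PySem.List.pyGet? xs i = some xs[i.toNat] := by
  conv_lhs => rw [show i = ((i.toNat : Nat) : Int) from (Int.toNat_of_nonneg h0).symm]
  rw [PySem.List.pyGet?_natCast]
  exact List.getElem?_eq_getElem h

-- equal-numbers case: A's loop vs B's assembly, suffix by suffix
theorem pv_equal_fold (label : String) (inputs outputs : List (String × String))
    (hlen : inputs.length = outputs.length) :
    ∀ (n : Nat) (k ic oc : Int) (accA : String),
      k = (inputs.length : Int) - n → 0 ≤ k →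
      ((PySem.List.pyRange k (inputs.length : Int)).foldl
          (pvAStep label inputs outputs none ((inputs.length : Int))) (ic, oc, accA)).2.2
        = accA ++ PySem.Str.join ""
            ((PySem.List.pyRange k (inputs.length : Int)).map
              (pvBRow label (inputs.length : Int) (pvSpanOneDict inputs) (pvSpanOneDict outputs))) := by
  intro n
  induction n with
  | zero =>
    intro k ic oc accA hk hk0
    rw [PySem.List.pyRange_one_eq_nil (by omega)]
    simp [PySem.Str.join, PySem.Chars.join_nil]
  | succ m ih =>
    intro k ic oc accA hk hk0
    have hklt : k < (inputs.length : Int) := by omega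
    rw [PySem.List.pyRange_one_cons hklt, List.foldl_cons, List.map_cons, pv_join_empty_cons]
    have hIn := pv_pyGet?_of_lt inputs k hk0 (by omega)
    have hOut := pv_pyGet?_of_lt outputs k hk0 (by omega)
    have hInB := pv_spanOne_get?_hit inputs k.toNat (by omega)
    have hOutB := pv_spanOne_get?_hit outputs k.toNat (by omega)
    rw [show ((k.toNat : Nat) : Int) = k from Int.toNat_of_nonneg hk0] at hInB hOutB
    have hstep : pvAStep label inputs outputs none (inputs.length : Int) (ic, oc, accA) k
        = (ic + 1, oc + 1,
            accA ++ pvBRow label (inputs.length : Int) (pvSpanOneDict inputs) (pvSpanOneDict outputs) k) := by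
      simp [pvAStep, pvBRow, hIn, hOut, hInB, hOutB]
    rw [hstep, ih _ _ _ _ (by omega) (by omega), String.append_assoc]

-- more-inputs case: A's loop with its output counter vs B's strided placement map
theorem pv_inputs_fold (label : String) (inputs outputs : List (String × String))
    (hpos : 0 < outputs.length) (hlt : outputs.length < inputs.length)
    (s : Int) (hseq : s = PySem.Int.floordiv (inputs.length : Int) (outputs.length : Int))
    (hs1 : 1 ≤ s) :
    ∀ (n : Nat) (k ic oc : Int) (accA : String),
      k = (inputs.length : Int) - n → 0 ≤ k →
      0 ≤ oc → oc ≤ (outputs.length : Int) →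
      (oc < (outputs.length : Int) → k ≤ oc * s) →
      (0 < oc → (oc - 1) * s < k) →
      ((PySem.List.pyRange k (inputs.length : Int)).foldl
          (pvAStep label inputs outputs (some "inputs") ((inputs.length : Int))) (ic, oc, accA)).2.2
        = accA ++ PySem.Str.join ""
            ((PySem.List.pyRange k (inputs.length : Int)).map
              (pvBRow label (inputs.length : Int) (pvSpanOneDict inputs)
                (pvStrideDict outputs s (inputs.length : Int)))) := by
  intro n
  induction n with
  | zero =>
    intro k ic oc accA hk hk0 _ _ _ _
    rw [PySem.List.pyRange_one_eq_nil (by omega)]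
    simp [PySem.Str.join, PySem.Chars.join_nil]
  | succ m ih =>
    intro k ic oc accA hk hk0 hoc0 hocle hinv3 hinv4
    have hklt : k < (inputs.length : Int) := by omega
    rw [PySem.List.pyRange_one_cons hklt, List.foldl_cons, List.map_cons, pv_join_empty_cons]
    have hIn := pv_pyGet?_of_lt inputs k hk0 (by omega)
    have hInB := pv_spanOne_get?_hit inputs k.toNat (by omega)
    rw [show ((k.toNat : Nat) : Int) = k from Int.toNat_of_nonneg hk0] at hInB
    by_cases hC : oc < (outputs.length : Int) ∧ k = oc * s
    · -- A places output number oc on this row; B's map has the same entry at key oc*s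
      obtain ⟨hoclt, hkeq⟩ := hC
      have hocnat : ((oc.toNat : Nat) : Int) = oc := Int.toNat_of_nonneg hoc0
      have hOut := pv_pyGet?_of_lt outputs oc hoc0 (by omega)
      have hOutB := pv_stride_get?_hit outputs s (inputs.length : Int) (by omega) oc.toNat (by omega)
      rw [hocnat] at hOutB
      rw [← hkeq] at hOutB
      have hstep : pvAStep label inputs outputs (some "inputs") (inputs.length : Int) (ic, oc, accA) k
          = (ic + 1, oc + 1,
              accA ++ pvBRow label (inputs.length : Int) (pvSpanOneDict inputs)
                (pvStrideDict outputs s (inputs.length : Int)) k) := by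
        simp only [pvAStep, pvBRow, ← hseq]
        simp only [if_true]
        rw [if_pos ⟨hoclt, hkeq⟩]
        rw [hIn, hInB, hOut, hOutB]
        simp
      rw [hstep, ih _ _ _ _ (by omega) (by omega) (by omega) (by omega)
          (fun h => by nlinarith) (fun h => by nlinarith), String.append_assoc]
    · -- no output starts on this row: B's strided map misses k as well
      have hOutB : (pvStrideDict outputs s (inputs.length : Int)).get? k = none := by
        apply pv_stride_get?_miss outputs s (inputs.length : Int) (by omega)
        intro j hj heq
        have hjlt : (j : Int) < (outputs.length : Int) := by exact_mod_cast hj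
        by_cases hoclt : oc < (outputs.length : Int)
        · have hkne : k ≠ oc * s := fun h => hC ⟨hoclt, h⟩
          have hklt' : k < oc * s := lt_of_le_of_ne (hinv3 hoclt) hkne
          have hjoc : (j : Int) < oc := by
            have := heq ▸ hklt'
            exact lt_of_mul_lt_mul_right this (by omega)
          have hocpos : 0 < oc := by omega
          have h4 := hinv4 hocpos
          rw [heq] at h4
          have : oc - 1 < (j : Int) := lt_of_mul_lt_mul_right h4 (by omega)
          omega
        · have hoceq : oc = (outputs.length : Int) := by omega
          have h4 := hinv4 (by omega)
          rw [heq] at h4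
          have : oc - 1 < (j : Int) := lt_of_mul_lt_mul_right h4 (by omega)
          omega
      have hstep : pvAStep label inputs outputs (some "inputs") (inputs.length : Int) (ic, oc, accA) k
          = (ic + 1, oc,
              accA ++ pvBRow label (inputs.length : Int) (pvSpanOneDict inputs)
                (pvStrideDict outputs s (inputs.length : Int)) k) := by
        simp only [pvAStep, pvBRow, ← hseq]
        simp only [if_true]
        rw [if_neg hC]
        rw [hIn, hInB, hOutB]
        simp
      rw [hstep, ih _ _ _ _ (by omega) (by omega) (by omega) (by omega)
          (fun h => by
            have := hinv3 h
            omega)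
          (fun h => by
            have := hinv4 h
            omega), String.append_assoc]

-- more-outputs case: the mirror image
theorem pv_outputs_fold (label : String) (inputs outputs : List (String × String))
    (hpos : 0 < inputs.length) (hlt : inputs.length < outputs.length)
    (s : Int) (hseq : s = PySem.Int.floordiv (outputs.length : Int) (inputs.length : Int))
    (hs1 : 1 ≤ s) :
    ∀ (n : Nat) (k ic oc : Int) (accA : String),
      k = (outputs.length : Int) - n → 0 ≤ k →
      0 ≤ ic → ic ≤ (inputs.length : Int) →
      (ic < (inputs.length : Int) → k ≤ ic * s) →
      (0 < ic → (ic - 1) * s < k) →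
      ((PySem.List.pyRange k (outputs.length : Int)).foldl
          (pvAStep label inputs outputs (some "outputs") ((outputs.length : Int))) (ic, oc, accA)).2.2
        = accA ++ PySem.Str.join ""
            ((PySem.List.pyRange k (outputs.length : Int)).map
              (pvBRow label (outputs.length : Int)
                (pvStrideDict inputs s (outputs.length : Int)) (pvSpanOneDict outputs))) := by
  intro n
  induction n with
  | zero =>
    intro k ic oc accA hk hk0 _ _ _ _
    rw [PySem.List.pyRange_one_eq_nil (by omega)]
    simp [PySem.Str.join, PySem.Chars.join_nil]
  | succ m ih =>
    intro k ic oc accA hk hk0 hic0 hicle hinv3 hinv4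
    have hklt : k < (outputs.length : Int) := by omega
    rw [PySem.List.pyRange_one_cons hklt, List.foldl_cons, List.map_cons, pv_join_empty_cons]
    have hOut := pv_pyGet?_of_lt outputs k hk0 (by omega)
    have hOutB := pv_spanOne_get?_hit outputs k.toNat (by omega)
    rw [show ((k.toNat : Nat) : Int) = k from Int.toNat_of_nonneg hk0] at hOutB
    by_cases hC : ic < (inputs.length : Int) ∧ k = ic * s
    · obtain ⟨hiclt, hkeq⟩ := hC
      have hicnat : ((ic.toNat : Nat) : Int) = ic := Int.toNat_of_nonneg hic0
      have hIn := pv_pyGet?_of_lt inputs ic hic0 (by omega)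
      have hInB := pv_stride_get?_hit inputs s (outputs.length : Int) (by omega) ic.toNat (by omega)
      rw [hicnat] at hInB
      rw [← hkeq] at hInB
      have hstep : pvAStep label inputs outputs (some "outputs") (outputs.length : Int) (ic, oc, accA) k
          = (ic + 1, oc + 1,
              accA ++ pvBRow label (outputs.length : Int)
                (pvStrideDict inputs s (outputs.length : Int)) (pvSpanOneDict outputs) k) := by
        simp only [pvAStep, pvBRow, ← hseq]
        rw [if_neg (show ¬((some "outputs" : Option String) = some "inputs") by decide)]
        simp only [if_true]
        rw [if_pos ⟨hiclt, hkeq⟩]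
        rw [hIn, hInB, hOut, hOutB]
        simp
      rw [hstep, ih _ _ _ _ (by omega) (by omega) (by omega) (by omega)
          (fun h => by nlinarith) (fun h => by nlinarith), String.append_assoc]
    · have hInB : (pvStrideDict inputs s (outputs.length : Int)).get? k = none := by
        apply pv_stride_get?_miss inputs s (outputs.length : Int) (by omega)
        intro j hj heq
        have hjlt : (j : Int) < (inputs.length : Int) := by exact_mod_cast hj
        by_cases hiclt : ic < (inputs.length : Int)
        · have hkne : k ≠ ic * s := fun h => hC ⟨hiclt, h⟩
          have hklt' : k < ic * s := lt_of_le_of_ne (hinv3 hiclt) hkne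
          have hjic : (j : Int) < ic := by
            have := heq ▸ hklt'
            exact lt_of_mul_lt_mul_right this (by omega)
          have hicpos : 0 < ic := by omega
          have h4 := hinv4 hicpos
          rw [heq] at h4
          have : ic - 1 < (j : Int) := lt_of_mul_lt_mul_right h4 (by omega)
          omega
        · have h4 := hinv4 (by omega)
          rw [heq] at h4
          have : ic - 1 < (j : Int) := lt_of_mul_lt_mul_right h4 (by omega)
          omega
      have hstep : pvAStep label inputs outputs (some "outputs") (outputs.length : Int) (ic, oc, accA) k
          = (ic, oc + 1,
              accA ++ pvBRow label (outputs.length : Int)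
                (pvStrideDict inputs s (outputs.length : Int)) (pvSpanOneDict outputs) k) := by
        simp only [pvAStep, pvBRow, ← hseq]
        rw [if_neg (show ¬((some "outputs" : Option String) = some "inputs") by decide)]
        simp only [if_true]
        rw [if_neg hC]
        rw [hOut, hOutB, hInB]
        simp
      rw [hstep, ih _ _ _ _ (by omega) (by omega) (by omega) (by omega)
          (fun h => by
            have := hinv3 h
            omega)
          (fun h => by
            have := hinv4 h
            omega), String.append_assoc]

-- ===== VERDICT (by name: the statement is the Claim_ definition above) =====
theorem get_html_rows_for_node_py_spec : Claim_equal_get_html_rows_for_node_py := by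
  intro label inputs outputs _hDom hPre
  unfold Spec_get_html_rows_for_node_py
  unfold Pre_get_html_rows_for_node_py at hPre
  rcases lt_trichotomy inputs.length outputs.length with hlt | heq | hgt
  · -- more outputs
    have hin : inputs ≠ [] := by
      intro h
      have : outputs = [] := hPre.mp h
      simp [h, this] at hlt
    have hpos : 0 < inputs.length := List.length_pos_iff.mpr hin
    have h1 : ¬((inputs.length : Int) > (outputs.length : Int)) := by exact_mod_cast by omega
    have h2 : ((inputs.length : Int) < (outputs.length : Int)) := by exact_mod_cast hlt
    have h3 : ¬((inputs.length : Int) = (outputs.length : Int)) := by omega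
    have hs1 : 1 ≤ PySem.Int.floordiv (outputs.length : Int) (inputs.length : Int) := by
      rw [PySem.Int.floordiv_eq_ediv_of_pos (by exact_mod_cast hpos)]
      exact (Int.le_ediv_iff_mul_le (a := 1) (b := (outputs.length : Int))
        (c := (inputs.length : Int)) (by exact_mod_cast hpos)).mpr (by omega)
    simp only [get_html_rows_for_node_py, get_html_rows_for_node_py_alt]
    rw [if_neg h1, if_pos h2, if_neg h3, if_neg h1,
        show max ((inputs.length : Int)) ((outputs.length : Int)) = (outputs.length : Int) from by omega,
        PySem.List.foldl_append_singleton_eq_map, List.nil_append]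
    rw [pv_outputs_fold label inputs outputs hpos hlt _ rfl hs1 outputs.length 0 0 0 ""
        (by omega) (by omega) (by omega) (by omega)
        (fun _ => by simp) (fun h => by omega)]
    apply String.toList_inj.mp
    simp
  · -- equal numbers
    have hInt : (inputs.length : Int) = (outputs.length : Int) := by exact_mod_cast heq
    have h1 : ¬((inputs.length : Int) > (outputs.length : Int)) := by omega
    have h2 : ¬((inputs.length : Int) < (outputs.length : Int)) := by omega
    simp only [get_html_rows_for_node_py, get_html_rows_for_node_py_alt]
    rw [if_neg h1, if_neg h2, if_pos hInt,
        show max ((inputs.length : Int)) ((outputs.length : Int)) = (inputs.length : Int) from by omega,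
        PySem.List.foldl_append_singleton_eq_map, List.nil_append]
    rw [pv_equal_fold label inputs outputs heq inputs.length 0 0 0 "" (by omega) (by omega)]
    apply String.toList_inj.mp
    simp
  · -- more inputs
    have hout : outputs ≠ [] := by
      intro h
      have : inputs = [] := hPre.mpr h
      simp [h, this] at hgt
    have hpos : 0 < outputs.length := List.length_pos_iff.mpr hout
    have h1 : ((inputs.length : Int) > (outputs.length : Int)) := by exact_mod_cast hgt
    have hs1 : 1 ≤ PySem.Int.floordiv (inputs.length : Int) (outputs.length : Int) := by
      rw [PySem.Int.floordiv_eq_ediv_of_pos (by exact_mod_cast hpos)]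
      exact (Int.le_ediv_iff_mul_le (a := 1) (b := (inputs.length : Int))
        (c := (outputs.length : Int)) (by exact_mod_cast hpos)).mpr (by omega)
    have h3 : ¬((inputs.length : Int) = (outputs.length : Int)) := by omega
    simp only [get_html_rows_for_node_py, get_html_rows_for_node_py_alt]
    rw [if_pos h1, if_neg h3, if_pos h1,
        show max ((inputs.length : Int)) ((outputs.length : Int)) = (inputs.length : Int) from by omega,
        PySem.List.foldl_append_singleton_eq_map, List.nil_append]
    rw [pv_inputs_fold label inputs outputs hpos hgt _ rfl hs1 inputs.length 0 0 0 ""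
        (by omega) (by omega) (by omega) (by omega)
        (fun _ => by simp) (fun h => by omega)]
    apply String.toList_inj.mp
    simp
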